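-- pv_equiv track=rewrite | github.com/paiml/depyler | examples/hard_numeric_rk4.py | rk4_quadratic
-- ===== SOURCE A (Python) =====
-- def rk4_quadratic(y0: int, x0: int, steps: int, h: int) -> int:
--     """RK4 for dy/dx = 2*x, y(x0)=y0. Step size h.
--     Returns y * 1 (integer)."""
--     y: int = y0
--     x: int = x0
--     i: int = 0
--     while i < steps:
--         k1: int = 2 * x * h
--         k2: int = (2 * x + h) * h
--         k3: int = (2 * x + h) * h
--         k4: int = (2 * (x + h)) * h
--         dy: int = (k1 + 2 * k2 + 2 * k3 + k4) // 6
--         y = y + dy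
--         x = x + h
--         i = i + 1
--     return y
-- ===== SOURCE B (Python) =====
-- def rk4_quadratic(y0: int, x0: int, steps: int, h: int) -> int:
--     """Closed form: each RK4 step adds exactly (2*x + h)*h, so after n = max(steps, 0)
--     steps y = y0 + 2*x0*h*n + h*h*n*n."""
--     n = steps if steps > 0 else 0
--     return y0 + 2 * x0 * h * n + h * h * n * n
-- ===== Notes on version B (the rewrite author's own statement) =====
-- stated objective: faster
-- what changed: Replaced the step-by-step RK4 loop by the exact closed form y0 + 2*x0*h*n + h^2*n^2 with n = max(steps, 0), since each step adds exactly (2*x+h)*h.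
import Mathlib
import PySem

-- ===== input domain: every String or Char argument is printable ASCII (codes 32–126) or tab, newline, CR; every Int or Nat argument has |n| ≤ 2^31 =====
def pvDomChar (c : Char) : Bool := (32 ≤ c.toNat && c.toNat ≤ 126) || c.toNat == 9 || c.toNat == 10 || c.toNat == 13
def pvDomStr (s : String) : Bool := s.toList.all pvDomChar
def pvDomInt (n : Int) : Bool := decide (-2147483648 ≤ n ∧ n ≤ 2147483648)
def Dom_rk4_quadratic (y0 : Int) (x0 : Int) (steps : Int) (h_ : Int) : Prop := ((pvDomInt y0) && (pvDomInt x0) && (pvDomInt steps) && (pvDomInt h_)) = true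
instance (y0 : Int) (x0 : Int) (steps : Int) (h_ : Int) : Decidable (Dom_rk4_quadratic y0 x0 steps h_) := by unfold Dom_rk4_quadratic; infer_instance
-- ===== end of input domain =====

-- B replaces A's per-step RK4 loop by the exact closed form y0 + 2*x0*h*n + h^2*n^2 (n = max(steps,0)); objective: faster (measured).


-- ===== PORT A =====
-- literal port of A's while-loop: state (y, x), one iteration per remaining step
def rk4LoopA (h_ : Int) : Int → Int → Nat → Int
  | y, _, 0 => y
  | y, x, n + 1 =>
    let k1 : Int := 2 * x * h_
    let k2 : Int := (2 * x + h_) * h_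
    let k3 : Int := (2 * x + h_) * h_
    let k4 : Int := (2 * (x + h_)) * h_
    let dy : Int := PySem.Int.floordiv (k1 + 2 * k2 + 2 * k3 + k4) 6
    rk4LoopA h_ (y + dy) (x + h_) n

def rk4_quadratic (y0 : Int) (x0 : Int) (steps : Int) (h_ : Int) : Int :=
  rk4LoopA h_ y0 x0 steps.toNat

-- ===== PORT B =====
-- closed form: n = max(steps, 0); y0 + 2*x0*h*n + h^2*n^2
def rk4_quadratic_alt (y0 : Int) (x0 : Int) (steps : Int) (h_ : Int) : Int :=
  let n : Int := if steps > 0 then steps else 0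
  y0 + 2 * x0 * h_ * n + h_ * h_ * n * n

-- ===== PRECONDITION & SPEC =====
def Spec_rk4_quadratic (y0 : Int) (x0 : Int) (steps : Int) (h_ : Int) (out : Int) : Prop := out = rk4_quadratic_alt y0 x0 steps h_
instance (y0 : Int) (x0 : Int) (steps : Int) (h_ : Int) (out : Int) : Decidable (Spec_rk4_quadratic y0 x0 steps h_ out) := by unfold Spec_rk4_quadratic; infer_instance

-- ===== CLAIM (what is proved, stated in full; the proofs are below) =====
def Claim_equal_rk4_quadratic : Prop := ∀ (y0 : Int) (x0 : Int) (steps : Int) (h_ : Int), Dom_rk4_quadratic y0 x0 steps h_ → Spec_rk4_quadratic y0 x0 steps h_ (rk4_quadratic y0 x0 steps h_)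

-- ===== LEMMAS AND PROOFS =====

-- ===== VERDICT (by name: the statement is the Claim_ definition above) =====
-- each iteration adds exactly (2*x + h_)*h_; closed form by induction on the fuel
lemma rk4LoopA_closed (h_ y x : Int) (n : Nat) :
    rk4LoopA h_ y x n = y + 2 * x * h_ * n + h_ * h_ * n * n := by
  induction n generalizing y x with
  | zero => simp [rk4LoopA]
  | succ n ih =>
    have hdy : PySem.Int.floordiv (2 * x * h_ + 2 * ((2 * x + h_) * h_) +
        2 * ((2 * x + h_) * h_) + (2 * (x + h_)) * h_) 6 = (2 * x + h_) * h_ := by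
      have : 2 * x * h_ + 2 * ((2 * x + h_) * h_) + 2 * ((2 * x + h_) * h_) +
          (2 * (x + h_)) * h_ = ((2 * x + h_) * h_) * 6 := by ring
      rw [this, PySem.Int.floordiv_eq_ediv_of_pos (by norm_num)]
      exact Int.mul_ediv_cancel _ (by norm_num)
    simp only [rk4LoopA, ih, hdy]
    push_cast
    ring

theorem rk4_quadratic_spec : Claim_equal_rk4_quadratic := by
  intro y0 x0 steps h_ _
  unfold Spec_rk4_quadratic rk4_quadratic rk4_quadratic_alt
  rw [rk4LoopA_closed]
  by_cases hs : steps > 0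
  · rw [Int.toNat_of_nonneg hs.le, if_pos hs]
  · simp [Int.toNat_of_nonpos (not_lt.mp hs), if_neg hs]
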